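-- pv_equiv track=rewrite | github.com/bobsync/ENIB | decider/pipeline_2.py | _assign_time_markers
-- ===== SOURCE A (Python) =====
-- from typing import Any, Dict, List, Optional, Tuple
--
-- def _assign_time_markers(parsed: List[Tuple[str, bool]]) -> Tuple[List[str], int]:
--     """Inserts BML <mark> tags for synchronization."""
--     markers: List[str] = []
--     idx = 0
--
--     def attach_punctuation(tokens: List[str]) -> List[str]:
--         merged: List[str] = []
--         for tok in tokens:
--             if tok in {'.', ',', '!', '?'} and merged:
--                 merged[-1] += tok
--             else:
--                 merged.append(tok)
--         return merged
--
--     for word, is_marked in parsed: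
--         if is_marked:
--             markers.append(f'<mark name="tm{idx}"/> {word}')
--             idx += 1
--         else:
--             markers.append(word)
--     markers.append(f'<mark name="tm{idx}"/>')
--     return attach_punctuation(markers), idx
-- ===== SOURCE B (Python) =====
-- from typing import List, Tuple
--
-- def _assign_time_markers(parsed: List[Tuple[str, bool]]) -> Tuple[List[str], int]:
--     """Single fused pass: insert marks and merge punctuation as we go."""
--     merged: List[str] = []
--     idx = 0
--     for word, is_marked in parsed:
--         if is_marked:
--             merged.append(f'<mark name="tm{idx}"/> {word}')
--             idx += 1
--         elif word in {'.', ',', '!', '?'} and merged: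
--             merged[-1] += word
--         else:
--             merged.append(word)
--     merged.append(f'<mark name="tm{idx}"/>')
--     return merged, idx
-- ===== Notes on version B (the rewrite author's own statement) =====
-- stated objective: simpler
-- what changed: Fuses A's two phases (build markers list, then rescan with the attach_punctuation helper) into one loop over parsed that writes directly into the output list, dropping the intermediate list and the helper.
import Mathlib
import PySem

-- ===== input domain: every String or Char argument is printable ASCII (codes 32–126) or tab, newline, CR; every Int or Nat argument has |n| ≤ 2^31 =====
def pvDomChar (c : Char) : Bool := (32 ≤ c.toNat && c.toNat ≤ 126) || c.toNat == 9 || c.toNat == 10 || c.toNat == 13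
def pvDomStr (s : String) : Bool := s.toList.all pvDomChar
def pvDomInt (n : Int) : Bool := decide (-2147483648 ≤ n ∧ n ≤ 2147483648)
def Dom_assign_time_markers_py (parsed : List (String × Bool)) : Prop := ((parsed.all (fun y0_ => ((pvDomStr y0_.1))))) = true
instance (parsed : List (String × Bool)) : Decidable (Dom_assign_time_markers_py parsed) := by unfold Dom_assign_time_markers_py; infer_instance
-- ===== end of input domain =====

-- B fuses A's two phases (build markers list, then rescan via attach_punctuation) into one
-- pass writing directly into the output list; objective: simpler.

-- ===== PORT A =====
-- tok in {'.', ',', '!', '?'}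
def pvIsPunct (s : String) : Bool := s == "." || s == "," || s == "!" || s == "?"

-- f'<mark name="tm{idx}"/> {word}'
def pvTagWord (i : Int) (w : String) : String :=
  "<mark name=\"tm" ++ PySem.Int.toStr i ++ "\"/> " ++ w

-- f'<mark name="tm{idx}"/>'
def pvTagOnly (i : Int) : String :=
  "<mark name=\"tm" ++ PySem.Int.toStr i ++ "\"/>"

-- merged[-1] += tok, on the REVERSED accumulator (append-at-end ↔ cons-at-front)
def pvMergeHead (acc : List String) (tok : String) : List String :=
  match acc with
  | [] => [tok]
  | h :: t => (h ++ tok) :: t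

-- the attach_punctuation helper: loop over tokens with accumulator merged (kept reversed)
def pvAttachGo (acc : List String) : List String → List String
  | [] => acc
  | tok :: rest =>
      if pvIsPunct tok && !acc.isEmpty then pvAttachGo (pvMergeHead acc tok) rest
      else pvAttachGo (tok :: acc) rest

-- the first loop of A: builds (markers, idx)
def pvALoop : List (String × Bool) → Int → List String × Int
  | [], i => ([], i)
  | (w, b) :: t, i =>
      if b then
        let r := pvALoop t (i + 1)
        (pvTagWord i w :: r.1, r.2)
      else
        let r := pvALoop t i
        (w :: r.1, r.2)

def assign_time_markers_py (parsed : List (String × Bool)) : List String × Int :=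
  let r := pvALoop parsed 0
  ((pvAttachGo [] (r.1 ++ [pvTagOnly r.2])).reverse, r.2)

-- ===== PORT B =====
-- the single fused loop of B, accumulator merged kept reversed
def pvBLoop : List (String × Bool) → List String → Int → List String × Int
  | [], acc, i => (acc, i)
  | (w, b) :: t, acc, i =>
      if b then pvBLoop t (pvTagWord i w :: acc) (i + 1)
      else if pvIsPunct w && !acc.isEmpty then pvBLoop t (pvMergeHead acc w) i
      else pvBLoop t (w :: acc) i

def assign_time_markers_py_alt (parsed : List (String × Bool)) : List String × Int :=
  let r := pvBLoop parsed [] 0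
  ((pvTagOnly r.2 :: r.1).reverse, r.2)

-- ===== PRECONDITION & SPEC =====
def Spec_assign_time_markers_py (parsed : List (String × Bool)) (out : List String × Int) : Prop := out = assign_time_markers_py_alt parsed
instance (parsed : List (String × Bool)) (out : List String × Int) : Decidable (Spec_assign_time_markers_py parsed out) := by unfold Spec_assign_time_markers_py; infer_instance

-- ===== CLAIM (what is proved, stated in full; the proofs are below) =====
def Claim_equal_assign_time_markers_py : Prop := ∀ (parsed : List (String × Bool)), Dom_assign_time_markers_py parsed → Spec_assign_time_markers_py parsed (assign_time_markers_py parsed)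

-- ===== LEMMAS AND PROOFS =====

-- a string beginning with the mark prefix is never one of the four punctuation strings
lemma pvIsPunct_tag (x y : String) : pvIsPunct ("<mark name=\"tm" ++ x ++ y) = false := by
  apply Bool.eq_false_iff.2
  intro hcontra
  unfold pvIsPunct at hcontra
  simp only [Bool.or_eq_true, beq_iff_eq] at hcontra
  rcases hcontra with ((h1 | h1) | h1) | h1 <;>
    · have := congrArg String.toList h1
      simp [String.toList_append] at this

lemma pvIsPunct_tagWord (i : Int) (w : String) : pvIsPunct (pvTagWord i w) = false := by
  unfold pvTagWord
  have := pvIsPunct_tag (PySem.Int.toStr i) ("\"/> " ++ w)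
  simpa [String.append_assoc] using this

lemma pvIsPunct_tagOnly (i : Int) : pvIsPunct (pvTagOnly i) = false := by
  unfold pvTagOnly
  exact pvIsPunct_tag (PySem.Int.toStr i) "\"/>"

-- fused loop = A's build loop followed by attach_punctuation, for every accumulator
lemma pvBLoop_eq (parsed : List (String × Bool)) :
    ∀ (acc : List String) (i : Int),
      pvBLoop parsed acc i = (pvAttachGo acc (pvALoop parsed i).1, (pvALoop parsed i).2) := by
  induction parsed with
  | nil => intro acc i; simp [pvBLoop, pvALoop, pvAttachGo]
  | cons hd tl ih =>
      intro acc i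
      obtain ⟨w, b⟩ := hd
      cases b with
      | true =>
          simp only [pvBLoop, pvALoop]
          rw [ih]
          simp [pvAttachGo, pvIsPunct_tagWord]
      | false =>
          simp only [pvBLoop, pvALoop, Bool.false_eq_true, if_false]
          by_cases hp : (pvIsPunct w && !acc.isEmpty) = true
          · rw [if_pos hp]
            have h2 : pvAttachGo acc (w :: (pvALoop tl i).1)
                = pvAttachGo (pvMergeHead acc w) (pvALoop tl i).1 := by
              simp [pvAttachGo, hp]
            rw [h2]
            exact ih _ i
          · rw [if_neg hp]
            have h2 : pvAttachGo acc (w :: (pvALoop tl i).1)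
                = pvAttachGo (w :: acc) (pvALoop tl i).1 := by
              simp [pvAttachGo, hp]
            rw [h2]
            exact ih _ i

-- a non-punctuation token appended at the end of the token list is consed onto the result
lemma pvAttachGo_append_nonpunct (t : String) (ht : pvIsPunct t = false) :
    ∀ (ms : List String) (acc : List String),
      pvAttachGo acc (ms ++ [t]) = t :: pvAttachGo acc ms := by
  intro ms
  induction ms with
  | nil => intro acc; simp [pvAttachGo, ht]
  | cons m rest ih =>
      intro acc
      simp only [List.cons_append, pvAttachGo]
      by_cases hp : (pvIsPunct m && !acc.isEmpty) = true
      · simp only [hp]; exact ih _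
      · simp only [if_neg hp]; exact ih _

-- ===== VERDICT (by name: the statement is the Claim_ definition above) =====
theorem assign_time_markers_py_spec : Claim_equal_assign_time_markers_py := by
  intro parsed _
  unfold Spec_assign_time_markers_py assign_time_markers_py assign_time_markers_py_alt
  rw [pvBLoop_eq parsed [] 0]
  simp only [pvAttachGo_append_nonpunct _ (pvIsPunct_tagOnly (pvALoop parsed 0).2)]
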